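-- pv_equiv track=rewrite | github.com/GLamotBach/AdventOfCode2024 | day_2.py | problem_dampener
-- ===== SOURCE A (Python) =====
-- def validate_report(report):
--     if report[0] > report[1]:
--         for level in range(len(report) - 1):
--             decrease_rate = report[level] - report[level+1]
--             if 0 >= decrease_rate or decrease_rate > 3:
--                 return False
--     elif report[0] < report[1]:
--         for level in range(len(report) - 1):
--             increase_rate = report[level] - report[level+1]
--             if 0 <= increase_rate or increase_rate < -3:
--                 return False
--     else:
--         return False
--     return True
--
-- def problem_dampener(report):
--     fixed = False
--     for i in range(len(report)):
--         dampened_report = report.copy()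
--         del dampened_report[i]
--         if validate_report(dampened_report):
--             fixed = True
--     return fixed
-- ===== SOURCE B (Python) =====
-- # Single-pass dampener: walk to the first violating adjacent pair and test only the
-- # two deletions that can repair it (plus "already valid" => drop the last level).
-- def _chain_from(r, j, lo, hi):
--     # is every adjacent step of r[j:] within [lo, hi]?
--     return all(lo <= r[k + 1] - r[k] <= hi for k in range(j, len(r) - 1))
--
-- def _one_off(r, lo, hi):
--     # can deleting exactly one level of r leave every step within [lo, hi]?
--     i = 0
--     while i + 1 < len(r) and lo <= r[i + 1] - r[i] <= hi:
--         i += 1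
--     if i + 1 >= len(r):
--         return True  # whole report is a valid chain: dropping the last level keeps it valid
--     # first violating pair is (r[i], r[i+1]); only deleting i or i+1 can help
--     drop_i = (i == 0 or lo <= r[i + 1] - r[i - 1] <= hi) and _chain_from(r, i + 1, lo, hi)
--     drop_next = (i + 2 >= len(r) or lo <= r[i + 2] - r[i] <= hi) and _chain_from(r, i + 2, lo, hi)
--     return drop_i or drop_next
--
-- def problem_dampener(report):
--     if not report:
--         return False
--     return _one_off(report, 1, 3) or _one_off(report, -3, -1)
-- ===== Notes on version B (the rewrite author's own statement) =====
-- stated objective: faster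
-- what changed: A re-validates a fresh copy of the report for every deleted index (n deletions x O(n) validation); B walks the report once to the first violating adjacent step and checks only the two deletions that could repair it, per direction.
-- crash fix: On reports of length 1 or 2 A raises IndexError (validate_report indexes [0]/[1] of the one- or zero-element dampened report); B returns True, since dropping one level of such a report trivially leaves a safe one. — e.g. on problem_dampener([5]): A raises IndexError, B returns true
import Mathlib
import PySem

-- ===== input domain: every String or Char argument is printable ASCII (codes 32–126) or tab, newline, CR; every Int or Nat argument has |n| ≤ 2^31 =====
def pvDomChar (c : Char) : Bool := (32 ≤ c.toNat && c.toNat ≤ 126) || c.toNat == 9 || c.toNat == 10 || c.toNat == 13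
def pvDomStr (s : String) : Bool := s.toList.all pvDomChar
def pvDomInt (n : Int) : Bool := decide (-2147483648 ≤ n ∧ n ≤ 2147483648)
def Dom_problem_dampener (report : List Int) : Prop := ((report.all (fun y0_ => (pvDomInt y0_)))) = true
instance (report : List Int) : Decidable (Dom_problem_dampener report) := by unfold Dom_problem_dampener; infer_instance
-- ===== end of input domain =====

-- B replaces A's try-every-deletion O(n^2) scan by a single pass: walk to the first
-- violating adjacent pair and test only the two deletions that can repair it (O(n)).

-- ===== PORT A =====
-- literal port of validate_report; the 'match' is Python's report[0]/report[1]
-- (none = IndexError, unreachable under Pre_)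
def validate_report (report : List Int) : Bool :=
  match PySem.List.pyGet? report 0, PySem.List.pyGet? report 1 with
  | some r0, some r1 =>
    if r0 > r1 then
      (PySem.List.pyRange 0 ((report.length : Int) - 1) 1).all (fun level =>
        let decrease_rate := PySem.List.pyGetD report level 0 - PySem.List.pyGetD report (level + 1) 0
        !(decide (0 ≥ decrease_rate) || decide (decrease_rate > 3)))
    else if r0 < r1 then
      (PySem.List.pyRange 0 ((report.length : Int) - 1) 1).all (fun level =>
        let increase_rate := PySem.List.pyGetD report level 0 - PySem.List.pyGetD report (level + 1) 0
        !(decide (0 ≤ increase_rate) || decide (increase_rate < -3)))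
    else false
  | _, _ => false

def problem_dampener (report : List Int) : Bool :=
  (PySem.List.pyRange 0 (report.length : Int) 1).foldl
    (fun fixed i =>
      -- dampened_report = report.copy(); del dampened_report[i]  (i from range is ≥ 0)
      if validate_report (report.eraseIdx i.toNat) then true else fixed)
    false

-- ===== PORT B =====
-- Python report[k] for a nonnegative in-range index k
def bGet (r : List Int) (k : Nat) : Int := PySem.List.pyGetD r (k : Int) 0

-- the 'while' loop of _one_off: advance i while the pair (r[i], r[i+1]) is within [lo, hi]
def scanViol (r : List Int) (lo hi : Int) (i : Nat) : Nat :=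
  if h : i + 1 < r.length ∧ lo ≤ bGet r (i + 1) - bGet r i ∧ bGet r (i + 1) - bGet r i ≤ hi
  then scanViol r lo hi (i + 1) else i
  termination_by r.length - i
  decreasing_by omega

-- _chain_from: all(lo <= r[k+1] - r[k] <= hi for k in range(j, len(r)-1))
def chainFromB (r : List Int) (lo hi : Int) (j : Nat) : Bool :=
  (List.range' j (r.length - 1 - j)).all
    (fun k => decide (lo ≤ bGet r (k + 1) - bGet r k ∧ bGet r (k + 1) - bGet r k ≤ hi))

def oneOff (r : List Int) (lo hi : Int) : Bool :=
  let i := scanViol r lo hi 0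
  if r.length ≤ i + 1 then true
  else
    (((i == 0) || decide (lo ≤ bGet r (i + 1) - bGet r (i - 1) ∧ bGet r (i + 1) - bGet r (i - 1) ≤ hi))
        && chainFromB r lo hi (i + 1))
    || ((decide (r.length ≤ i + 2) || decide (lo ≤ bGet r (i + 2) - bGet r i ∧ bGet r (i + 2) - bGet r i ≤ hi))
        && chainFromB r lo hi (i + 2))

def problem_dampener_alt (report : List Int) : Bool :=
  if report.isEmpty then false
  else oneOff report 1 3 || oneOff report (-3) (-1)

-- ===== PRECONDITION & SPEC =====
-- Pre_ excludes reports of length 1 and 2, on which A's validate_report raises IndexError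
-- (report[0]/report[1] on the one- or zero-element dampened report).
def Pre_problem_dampener (report : List Int) : Prop :=
  report = [] ∨ 3 ≤ report.length
instance (report : List Int) : Decidable (Pre_problem_dampener report) := by
  unfold Pre_problem_dampener; infer_instance

def pvWitness_problem_dampener : List Int := ([1, 2, 3])

-- On reports of length 1 or 2 A raises IndexError; B returns True (dropping one level
-- of a one- or two-level report always leaves a trivially safe report).
def Raises_problem_dampener (report : List Int) : Prop :=
  report.length = 1 ∨ report.length = 2
instance (report : List Int) : Decidable (Raises_problem_dampener report) := by
  unfold Raises_problem_dampener; infer_instance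
def pvRaiseWitness_problem_dampener : List Int := ([5])
def pvRaiseWitnessOut_problem_dampener : Bool := true

def Spec_problem_dampener (report : List Int) (out : Bool) : Prop := out = problem_dampener_alt report
instance (report : List Int) (out : Bool) : Decidable (Spec_problem_dampener report out) := by
  unfold Spec_problem_dampener; infer_instance

-- ===== CLAIM (what is proved, stated in full; the proofs are below) =====
def Claim_equal_problem_dampener : Prop := ∀ (report : List Int), Dom_problem_dampener report → Pre_problem_dampener report → Spec_problem_dampener report (problem_dampener report)

def Claim_raises_problem_dampener : Prop :=
  (∀ (report : List Int), Dom_problem_dampener report → Raises_problem_dampener report → ¬ Pre_problem_dampener report) ∧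
  (Dom_problem_dampener pvRaiseWitness_problem_dampener ∧ Raises_problem_dampener pvRaiseWitness_problem_dampener ∧
    problem_dampener_alt pvRaiseWitness_problem_dampener = pvRaiseWitnessOut_problem_dampener)

-- ===== LEMMAS AND PROOFS =====

-- pair k of r is a step within [lo, hi]
def Good (r : List Int) (lo hi : Int) (k : Nat) : Prop :=
  lo ≤ r.getD (k + 1) 0 - r.getD k 0 ∧ r.getD (k + 1) 0 - r.getD k 0 ≤ hi

theorem bGet_eq_getD (r : List Int) (k : Nat) : bGet r k = r.getD k 0 :=
  PySem.List.pyGetD_natCast r k 0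

theorem scanViol_spec (r : List Int) (lo hi : Int) (i : Nat) :
    i ≤ scanViol r lo hi i ∧
    (∀ k, i ≤ k → k < scanViol r lo hi i → Good r lo hi k) ∧
    (scanViol r lo hi i + 1 < r.length → ¬ Good r lo hi (scanViol r lo hi i)) := by
  fun_induction scanViol r lo hi i with
  | case1 i h ih =>
    rcases ih with ⟨h1, h2, h3⟩
    refine ⟨by omega, ?_, h3⟩
    intro k hk1 hk2
    rcases Nat.eq_or_lt_of_le hk1 with he | hl
    · subst he
      constructor <;> (rw [← bGet_eq_getD, ← bGet_eq_getD]; omega)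
    · exact h2 k hl hk2
  | case2 i h =>
    refine ⟨le_refl _, by omega, ?_⟩
    intro hlen hg
    rcases hg with ⟨g1, g2⟩
    rw [← bGet_eq_getD, ← bGet_eq_getD] at g1 g2
    exact h ⟨hlen, by omega, by omega⟩

theorem chainFromB_iff (r : List Int) (lo hi : Int) (j : Nat) :
    chainFromB r lo hi j = true ↔ ∀ k, j ≤ k → k + 1 < r.length → Good r lo hi k := by
  unfold chainFromB
  rw [List.all_eq_true]
  constructor
  · intro h k hk1 hk2
    have := h k (by rw [List.mem_range'_1]; omega)
    rw [decide_eq_true_iff, bGet_eq_getD, bGet_eq_getD] at this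
    exact this
  · intro h k hk
    rw [List.mem_range'_1] at hk
    rw [decide_eq_true_iff, bGet_eq_getD, bGet_eq_getD]
    exact h k (by omega) (by omega)

theorem erase_getD (r : List Int) (i m : Nat) (hi : i < r.length) (hm : m < r.length - 1) :
    (r.eraseIdx i).getD m 0 = r.getD (if m < i then m else m + 1) 0 := by
  have h1 : m < (r.eraseIdx i).length := by rw [List.length_eraseIdx_of_lt hi]; omega
  rw [List.getD_eq_getElem _ _ h1, List.getElem_eraseIdx]
  split
  · rw [List.getD_eq_getElem _ _ (by omega)]
  · rw [List.getD_eq_getElem _ _ (by omega)]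

theorem validErase_iff (r : List Int) (lo hi : Int) (i : Nat) (hi' : i < r.length) :
    (∀ k, k + 1 < (r.eraseIdx i).length → Good (r.eraseIdx i) lo hi k) ↔
      ((∀ p, p + 1 < r.length → p ≠ i → p + 1 ≠ i → Good r lo hi p) ∧
       (0 < i → i + 1 < r.length →
         lo ≤ r.getD (i + 1) 0 - r.getD (i - 1) 0 ∧ r.getD (i + 1) 0 - r.getD (i - 1) 0 ≤ hi)) := by
  have hlen : (r.eraseIdx i).length = r.length - 1 := List.length_eraseIdx_of_lt hi'
  constructor
  · intro h
    constructor
    · intro p hp1 hp2 hp3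
      by_cases hpi : p < i
      · have hg := h p (by omega)
        unfold Good at hg ⊢
        rw [erase_getD r i p hi' (by omega), erase_getD r i (p + 1) hi' (by omega)] at hg
        rw [if_pos (show p + 1 < i by omega), if_pos (show p < i by omega)] at hg
        exact hg
      · have hg := h (p - 1) (by omega)
        unfold Good at hg ⊢
        rw [erase_getD r i (p - 1) hi' (by omega), erase_getD r i (p - 1 + 1) hi' (by omega)] at hg
        rw [if_neg (show ¬ p - 1 + 1 < i by omega), if_neg (show ¬ p - 1 < i by omega)] at hg
        rw [show p - 1 + 1 = p from by omega] at hg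
        exact hg
    · intro hi0 hin
      have hg := h (i - 1) (by omega)
      unfold Good at hg
      rw [erase_getD r i (i - 1) hi' (by omega), erase_getD r i (i - 1 + 1) hi' (by omega)] at hg
      rw [if_neg (show ¬ i - 1 + 1 < i by omega), if_pos (show i - 1 < i by omega)] at hg
      rw [show i - 1 + 1 = i from by omega] at hg
      exact hg
  · rintro ⟨hnt, hbr⟩ k hk
    rw [hlen] at hk
    unfold Good
    rw [erase_getD r i k hi' (by omega), erase_getD r i (k + 1) hi' (by omega)]
    by_cases h1 : k + 1 < i
    · rw [if_pos h1, if_pos (show k < i by omega)]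
      exact hnt k (by omega) (by omega) (by omega)
    · by_cases h2 : k < i
      · rw [if_neg h1, if_pos h2]
        have hb := hbr (by omega) (by omega)
        rw [show i - 1 = k from by omega, show i + 1 = k + 1 + 1 from by omega] at hb
        exact hb
      · rw [if_neg h1, if_neg h2]
        exact hnt (k + 1) (by omega) (by omega) (by omega)

theorem oneOff_iff (r : List Int) (lo hi : Int) (hr : r ≠ []) :
    oneOff r lo hi = true ↔ ∃ i < r.length, ∀ k, k + 1 < (r.eraseIdx i).length → Good (r.eraseIdx i) lo hi k := by
  have hn : 0 < r.length := List.length_pos_of_ne_nil hr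
  obtain ⟨-, hpref, hviol⟩ := scanViol_spec r lo hi 0
  simp only [oneOff]
  set j := scanViol r lo hi 0 with hj
  by_cases hle : r.length ≤ j + 1
  · rw [if_pos hle]
    refine iff_of_true rfl ⟨r.length - 1, by omega, ?_⟩
    rw [validErase_iff r lo hi _ (by omega)]
    refine ⟨fun p hp _ _ => hpref p (by omega) (by omega), fun h1 h2 => by omega⟩
  · rw [if_neg hle]
    have hviol' := hviol (by omega)
    rw [Bool.or_eq_true, Bool.and_eq_true, Bool.and_eq_true, Bool.or_eq_true, Bool.or_eq_true,
        beq_iff_eq, decide_eq_true_iff, decide_eq_true_iff, decide_eq_true_iff,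
        chainFromB_iff, chainFromB_iff]
    simp only [bGet_eq_getD]
    constructor
    · rintro (⟨hb, hc⟩ | ⟨hb, hc⟩)
      · refine ⟨j, by omega, ?_⟩
        rw [validErase_iff r lo hi j (by omega)]
        constructor
        · intro p hp hpj hpj1
          by_cases hpj' : p < j
          · exact hpref p (by omega) hpj'
          · exact hc p (by omega) hp
        · intro h0 hjn
          rcases hb with hb0 | hbv
          · omega
          · exact hbv
      · refine ⟨j + 1, by omega, ?_⟩
        rw [validErase_iff r lo hi (j + 1) (by omega)]
        constructor
        · intro p hp hpj hpj1
          by_cases hpj' : p < j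
          · exact hpref p (by omega) hpj'
          · exact hc p (by omega) hp
        · intro h0 hjn
          rcases hb with hb0 | hbv
          · omega
          · exact hbv
    · rintro ⟨i, hi', hV⟩
      rw [validErase_iff r lo hi i hi'] at hV
      obtain ⟨hnt, hbr⟩ := hV
      have hij : i = j ∨ i = j + 1 := by
        by_contra hne
        rw [not_or] at hne
        exact hviol' (hnt j (by omega) (by omega) (by omega))
      rcases hij with rfl | rfl
      · refine Or.inl ⟨?_, fun k hk1 hk2 => hnt k (by omega) (by omega) (by omega)⟩
        by_cases h0 : j = 0
        · exact Or.inl h0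
        · exact Or.inr (hbr (by omega) (by omega))
      · refine Or.inr ⟨?_, fun k hk1 hk2 => hnt k (by omega) (by omega) (by omega)⟩
        by_cases h2 : r.length ≤ j + 2
        · exact Or.inl h2
        · exact Or.inr (hbr (by omega) (by omega))

theorem all_pyRange_pred (r : List Int) (q : Int → Bool) :
    ((PySem.List.pyRange 0 ((r.length : Int) - 1) 1).all q = true) ↔
      ∀ k : Nat, k + 1 < r.length → q (k : Int) = true := by
  rw [PySem.List.pyRange_one]
  simp only [List.all_map, List.all_eq_true, List.mem_range, zero_add, sub_zero, Function.comp]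
  constructor
  · intro h k hk; exact h k (by omega)
  · intro h k hk; exact h k (by omega)

theorem validate_iff (s : List Int) (hs : 2 ≤ s.length) :
    validate_report s = true ↔
      (∀ k, k + 1 < s.length → Good s 1 3 k) ∨ (∀ k, k + 1 < s.length → Good s (-3) (-1) k) := by
  match s, hs with
  | a :: b :: t, _ =>
    have h0 : PySem.List.pyGet? (a :: b :: t) 0 = some a := PySem.List.pyGet?_zero_cons a (b :: t)
    have h1 : PySem.List.pyGet? (a :: b :: t) 1 = some b := by
      simp [PySem.List.pyGet?, PySem.List.pyIdx?]
    have hg0 : (a :: b :: t).getD 0 0 = a := rfl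
    have hg1 : (a :: b :: t).getD 1 0 = b := rfl
    unfold validate_report
    rw [h0, h1]
    simp only []
    by_cases hab : a > b
    · rw [if_pos hab, all_pyRange_pred]
      simp only [← Nat.cast_add_one, PySem.List.pyGetD_natCast]
      constructor
      · intro h
        refine Or.inr fun k hk => ?_
        have := h k hk
        simp only [Bool.not_eq_eq_eq_not, Bool.not_true, Bool.or_eq_false_iff,
          decide_eq_false_iff_not, not_le, not_lt] at this
        unfold Good
        omega
      · intro h k hk
        rcases h with h | h
        · exfalso
          have := h 0 (by simp)
          unfold Good at this
          rw [hg0, hg1] at this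
          omega
        · have := h k hk
          unfold Good at this
          simp only [Bool.not_eq_eq_eq_not, Bool.not_true, Bool.or_eq_false_iff,
            decide_eq_false_iff_not, not_le, not_lt]
          omega
    · rw [if_neg hab]
      by_cases hab2 : a < b
      · rw [if_pos hab2, all_pyRange_pred]
        simp only [← Nat.cast_add_one, PySem.List.pyGetD_natCast]
        constructor
        · intro h
          refine Or.inl fun k hk => ?_
          have := h k hk
          simp only [Bool.not_eq_eq_eq_not, Bool.not_true, Bool.or_eq_false_iff,
            decide_eq_false_iff_not, not_le, not_lt] at this
          unfold Good
          omega
        · intro h k hk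
          rcases h with h | h
          · have := h k hk
            unfold Good at this
            simp only [Bool.not_eq_eq_eq_not, Bool.not_true, Bool.or_eq_false_iff,
              decide_eq_false_iff_not, not_le, not_lt]
            omega
          · exfalso
            have := h 0 (by simp)
            unfold Good at this
            rw [hg0, hg1] at this
            omega
      · rw [if_neg hab2]
        simp only [false_iff, not_or, Bool.false_eq_true]
        constructor <;> intro h <;>
          · have := h 0 (by simp)
            unfold Good at this
            rw [hg0, hg1] at this
            omega

theorem foldl_if_any (l : List Int) (p : Int → Bool) (acc : Bool) :
    l.foldl (fun fixed i => if p i then true else fixed) acc = (acc || l.any p) := by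
  induction l generalizing acc with
  | nil => simp
  | cons a l ih =>
    simp only [List.foldl_cons, List.any_cons]
    rw [ih]
    cases h : p a <;> cases acc <;> simp_all

theorem problem_dampener_iff (r : List Int) :
    problem_dampener r = true ↔ ∃ i < r.length, validate_report (r.eraseIdx i) = true := by
  unfold problem_dampener
  rw [foldl_if_any, PySem.List.pyRange_one]
  simp only [Bool.false_or, List.any_map, List.any_eq_true, List.mem_range, zero_add, sub_zero,
    Function.comp, Int.toNat_natCast]

-- ===== VERDICT (by name: the statement is the Claim_ definition above) =====
theorem problem_dampener_spec : Claim_equal_problem_dampener := by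
  intro report hdom hpre
  unfold Spec_problem_dampener
  rcases hpre with rfl | hlen
  · decide
  · have hne : report ≠ [] := by intro h; subst h; simp at hlen
    have halt : problem_dampener_alt report = (oneOff report 1 3 || oneOff report (-3) (-1)) := by
      unfold problem_dampener_alt
      rw [if_neg (by simpa [List.isEmpty_iff] using hne)]
    have hiff : problem_dampener report = true ↔ problem_dampener_alt report = true := by
      rw [problem_dampener_iff, halt, Bool.or_eq_true, oneOff_iff report 1 3 hne,
        oneOff_iff report (-3) (-1) hne]
      constructor
      · rintro ⟨i, hi, hv⟩
        rw [validate_iff _ (by rw [List.length_eraseIdx_of_lt hi]; omega)] at hv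
        rcases hv with h | h
        · exact Or.inl ⟨i, hi, h⟩
        · exact Or.inr ⟨i, hi, h⟩
      · rintro (⟨i, hi, h⟩ | ⟨i, hi, h⟩)
        · exact ⟨i, hi, (validate_iff _ (by rw [List.length_eraseIdx_of_lt hi]; omega)).mpr (Or.inl h)⟩
        · exact ⟨i, hi, (validate_iff _ (by rw [List.length_eraseIdx_of_lt hi]; omega)).mpr (Or.inr h)⟩
    exact Bool.eq_iff_iff.mpr hiff

def problem_dampener_raises : Claim_raises_problem_dampener := by
  unfold Claim_raises_problem_dampener
  refine ⟨?_, by decide⟩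
  intro report _ hr hp
  unfold Raises_problem_dampener at hr
  unfold Pre_problem_dampener at hp
  rcases hp with h | h
  · subst h; simp at hr
  · omega
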